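-- pv_equiv track=rewrite | github.com/trpmoreira/conc_bancos_webapp | ficheiros_bancos.py | clean_cell_value
-- ===== SOURCE A (Python) =====
-- def clean_cell_value(value):
--     if value is None:
--         return ""
--
--     # Converte para string e remove espaços extras
--     value = str(value).strip()
--
--     # Se parece ser um número de documento (começa com B e tem números)
--     if value.startswith('B') and any(c.isdigit() for c in value):
--         # Remove todos os espaços e pega apenas os primeiros 11 caracteres
--         value = ''.join(value.split())[:11]
--
--     # Lista de caracteres ilegais no Excel
--     illegal_chars = [
--         '\x00', '\x01', '\x02', '\x03', '\x04', '\x05', '\x06', '\x07', '\x08', '\x0b',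
--         '\x0c', '\x0e', '\x0f', '\x10', '\x11', '\x12', '\x13', '\x14', '\x15', '\x16',
--         '\x17', '\x18', '\x19', '\x1a', '\x1b', '\x1c', '\x1d', '\x1e', '\x1f'
--     ]
--
--     # Remove caracteres ilegais
--     for char in illegal_chars:
--         value = value.replace(char, '')
--
--     # Remove outros caracteres problemáticos
--     problematic_chars = [':', '\\', '/', '?', '*', '[', ']', '\t', '\n', '\r']
--     for char in problematic_chars:
--         value = value.replace(char, '')
--
--     # Se ainda houver caracteres não imprimíveis, substitui por espaço
--     cleaned_value = ''.join(char if char.isprintable() else ' ' for char in value)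
--
--     return cleaned_value.strip()
-- ===== SOURCE B (Python) =====
-- PUNCT = set(':\\/?*[]')
--
--
-- def _clean(c):
--     if ord(c) < 32 or c in PUNCT:
--         return None
--     return c if c.isprintable() else ' '
--
--
-- def clean_cell_value(value):
--     if value is None:
--         return ""
--
--     s = str(value).strip()
--
--     # Document-number special case, same rule as the original
--     if s[:1] == 'B' and any(c.isdigit() for c in s):
--         s = ''.join(c for c in s if not c.isspace())[:11]
--
--     # One pass: every control char (0-31) and the problematic punctuation is
--     # dropped; any other non-printable character becomes a space.
--     return ''.join(filter(None, map(_clean, s))).strip()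
-- ===== Notes on version B (the rewrite author's own statement) =====
-- stated objective: simpler
-- what changed: Replaces the 39 sequential str.replace passes plus a final comprehension with a single map/filter pass driven by one per-character rule (drop every control char 0-31 and the punctuation set, space out other non-printables), and replaces join(split()) by a whitespace filter.
import Mathlib
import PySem

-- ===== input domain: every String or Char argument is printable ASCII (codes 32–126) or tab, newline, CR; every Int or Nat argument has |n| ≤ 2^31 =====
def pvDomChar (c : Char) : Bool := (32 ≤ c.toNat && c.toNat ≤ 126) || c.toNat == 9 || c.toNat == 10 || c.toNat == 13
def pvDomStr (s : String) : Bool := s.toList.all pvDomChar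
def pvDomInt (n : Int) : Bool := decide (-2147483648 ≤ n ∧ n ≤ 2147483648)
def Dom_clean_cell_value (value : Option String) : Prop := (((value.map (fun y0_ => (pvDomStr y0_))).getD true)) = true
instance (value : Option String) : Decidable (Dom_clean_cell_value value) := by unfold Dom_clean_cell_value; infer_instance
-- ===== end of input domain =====

-- B replaces A's 39 sequential replace passes + final comprehension by ONE map/filter pass with a per-character rule; objective: simpler.

-- ===== PORT A =====
-- c.isprintable(): exact on the ASCII-plus-tab/newline/CR domain (printable = codes 32..126 there)
def pvIsprintable (c : Char) : Bool := 32 ≤ c.toNat && c.toNat ≤ 126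

def pvIllegalChars : List Char :=
  ['\x00', '\x01', '\x02', '\x03', '\x04', '\x05', '\x06', '\x07', '\x08', '\x0b',
   '\x0c', '\x0e', '\x0f', '\x10', '\x11', '\x12', '\x13', '\x14', '\x15', '\x16',
   '\x17', '\x18', '\x19', '\x1a', '\x1b', '\x1c', '\x1d', '\x1e', '\x1f']

def pvProblematicChars : List Char := [':', '\\', '/', '?', '*', '[', ']', '\t', '\n', '\r']

def clean_cell_value (value : Option String) : String :=
  match value with
  | none => ""
  | some v0 =>
    let s0 := PySem.Chars.strip v0.toList
    let s1 := if PySem.Chars.startswith s0 ['B'] && s0.any PySem.Chars.isdigit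
              then PySem.List.slice (PySem.Chars.join [] (PySem.Chars.split₀ s0)) none (some 11)
              else s0
    let s2 := pvIllegalChars.foldl (fun v c => PySem.Chars.replace v [c] []) s1
    let s3 := pvProblematicChars.foldl (fun v c => PySem.Chars.replace v [c] []) s2
    -- ''.join(char if char.isprintable() else ' ' for char in value)
    let s4 := s3.map (fun c => if pvIsprintable c then c else ' ')
    String.ofList (PySem.Chars.strip s4)

-- ===== PORT B =====
-- PUNCT = set(':\\/?*[]')
def pvPunct : PySem.Set Char := PySem.Set.ofList [':', '\\', '/', '?', '*', '[', ']']

-- _clean(c): None to drop the char, else the char to keep (non-printables become ' ')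
def pvCleanChar (c : Char) : Option Char :=
  if decide (c.toNat < 32) || pvPunct.contains c then none
  else some (if pvIsprintable c then c else ' ')

def clean_cell_value_alt (value : Option String) : String :=
  match value with
  | none => ""
  | some v0 =>
    let s := PySem.Chars.strip v0.toList
    -- if s[:1] == 'B' and any(c.isdigit() for c in s): s = ''.join(c for c in s if not c.isspace())[:11]
    let s1 := if (PySem.Chars.slice s none (some 1) == ['B']) && s.any PySem.Chars.isdigit
              then PySem.List.slice (s.filter (fun c => !PySem.Chars.isspace c)) none (some 11)
              else s
    -- ''.join(filter(None, map(_clean, s))).strip()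
    String.ofList (PySem.Chars.strip ((s1.map pvCleanChar).filterMap id))

-- ===== PRECONDITION & SPEC =====
def Spec_clean_cell_value (value : Option String) (out : String) : Prop := out = clean_cell_value_alt value
instance (value : Option String) (out : String) : Decidable (Spec_clean_cell_value value out) := by unfold Spec_clean_cell_value; infer_instance

-- ===== CLAIM (what is proved, stated in full; the proofs are below) =====
def Claim_equal_clean_cell_value : Prop := ∀ (value : Option String), Dom_clean_cell_value value → Spec_clean_cell_value value (clean_cell_value value)

-- ===== LEMMAS AND PROOFS =====

-- value.replace(c, '') for a single character c is a filter
theorem replace_go_single (c : Char) :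
    ∀ (l : List Char) (fuel : Nat) (acc : List Char), l.length ≤ fuel →
      PySem.Chars.replace.go [c] [] fuel l acc = acc.reverse ++ l.filter (fun x => !(x == c)) := by
  intro l
  induction l with
  | nil =>
    intro fuel acc _
    cases fuel <;> simp [PySem.Chars.replace.go]
  | cons h t ih =>
    intro fuel acc hle
    cases fuel with
    | zero => simp at hle
    | succ n =>
      by_cases hc : h = c
      · subst hc
        rw [PySem.Chars.replace.go]
        rw [if_pos (by simp [List.isPrefixOf])]
        simp only [List.length_cons, List.length_nil, Nat.zero_add, List.drop_succ_cons,
          List.drop_zero, List.reverse_nil, List.nil_append]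
        rw [ih n acc (Nat.le_of_succ_le_succ (by simpa using hle))]
        simp
      · rw [PySem.Chars.replace.go]
        rw [if_neg (by simp [List.isPrefixOf]; exact fun hh => hc hh.symm)]
        rw [ih n (h :: acc) (Nat.le_of_succ_le_succ (by simpa using hle))]
        simp [hc]

theorem replace_single (c : Char) (s : List Char) :
    PySem.Chars.replace s [c] [] = s.filter (fun x => !(x == c)) := by
  rw [PySem.Chars.replace]
  simp only [List.isEmpty_cons, Bool.false_eq_true, if_false]
  simpa using replace_go_single c s s.length [] le_rfl

theorem foldl_replace_filter :
    ∀ (L : List Char) (s : List Char),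
      L.foldl (fun v c => PySem.Chars.replace v [c] []) s = s.filter (fun x => !(L.contains x)) := by
  intro L
  induction L with
  | nil => intro s; simp
  | cons c L ih =>
    intro s
    simp only [List.foldl_cons]
    rw [replace_single, ih, List.filter_filter]
    apply List.filter_congr
    intro a _
    by_cases hac : a = c
    · subst hac; simp
    · simp [hac]

-- the punctuation set, evaluated
theorem pvPunct_eval : pvPunct = [':', '\\', '/', '?', '*', '[', ']'] := by decide

-- the chars A removes are exactly B's rule: code < 32 or one of the punctuation set
theorem mem_remove_iff (c : Char) :
    c ∈ pvIllegalChars ++ pvProblematicChars ↔ (c.toNat < 32 ∨ c ∈ pvPunct) := by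
  constructor
  · intro h
    simp only [pvIllegalChars, pvProblematicChars, List.cons_append, List.nil_append] at h
    fin_cases h <;> decide
  · intro h
    rcases h with h | h
    · rw [← Char.ofNat_toNat c]
      set n := c.toNat with hn
      interval_cases n <;> decide
    · rw [pvPunct_eval] at h
      have h' : c ∈ ([':', '\\', '/', '?', '*', '[', ']'] : List Char) := h
      fin_cases h' <;> decide

theorem contains_remove (c : Char) :
    (pvIllegalChars ++ pvProblematicChars).contains c
      = (decide (c.toNat < 32) || pvPunct.contains c) := by
  by_cases h : c ∈ pvIllegalChars ++ pvProblematicChars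
  · rcases (mem_remove_iff c).mp h with h2 | h2 <;> simp [PySem.Set.contains, h, h2]
  · have hno := fun h2 => h ((mem_remove_iff c).mpr h2)
    have h1 : ¬ c.toNat < 32 := fun hh => hno (Or.inl hh)
    have h2 : c ∉ pvPunct := fun hh => hno (Or.inr hh)
    simp [PySem.Set.contains, h, h1, h2]

-- ''.join(parts) concatenates the pieces
theorem join_nil_flatten (parts : List (List Char)) :
    PySem.Chars.join [] parts = parts.flatten := by
  rw [PySem.Chars.join]
  induction parts with
  | nil => rfl
  | cons h t ih => cases t <;> simp_all [List.intercalate, List.intersperse]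

-- ''.join(s.split()) drops exactly the whitespace characters
theorem split0_go_flatten :
    ∀ (s cur : List Char) (acc : List (List Char)),
      (PySem.Chars.split₀.go s cur acc).flatten
        = acc.reverse.flatten ++ cur.reverse ++ s.filter (fun c => !PySem.Chars.isspace c) := by
  intro s
  induction s with
  | nil =>
    intro cur acc
    rw [PySem.Chars.split₀.go]
    by_cases h : cur = [] <;> simp [h]
  | cons c rest ih =>
    intro cur acc
    rw [PySem.Chars.split₀.go]
    by_cases hs : PySem.Chars.isspace c
    · by_cases h : cur = [] <;> simp [hs, h, ih]
    · simp [hs, ih]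

theorem split0_flatten (s : List Char) :
    (PySem.Chars.split₀ s).flatten = s.filter (fun c => !PySem.Chars.isspace c) := by
  rw [PySem.Chars.split₀]
  simpa using split0_go_flatten s [] []

-- s[:1] == 'B' is startswith('B')
theorem take_one_eq_startswith (s : List Char) :
    (PySem.Chars.slice s none (some 1) == ['B']) = PySem.Chars.startswith s ['B'] := by
  rw [PySem.Chars.slice_eq_listSlice]
  have h1 : PySem.List.slice s none (some 1) = s.take 1 := by
    simpa using PySem.List.slice_to (xs := s) (b := 1) (by norm_num)
  rw [h1, PySem.Chars.startswith]
  cases s with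
  | nil => simp [List.isPrefixOf]
  | cons h t => simp [List.isPrefixOf, eq_comm]

-- (filter p s).map f is one filterMap pass
theorem filter_map_eq_filterMap (p : Char → Bool) (f : Char → Char) (s : List Char) :
    (s.filter p).map f = s.filterMap (fun c => if p c then some (f c) else none) := by
  induction s with
  | nil => rfl
  | cons h t ih => by_cases hp : p h <;> simp [hp, ih]

-- B's per-char rule stated against A's removal lists
theorem pvCleanChar_eq (c : Char) :
    pvCleanChar c
      = if (!pvProblematicChars.contains c && !pvIllegalChars.contains c)
        then some (if pvIsprintable c then c else ' ') else none := by
  rw [pvCleanChar, ← contains_remove]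
  have : (pvIllegalChars ++ pvProblematicChars).contains c
      = (pvIllegalChars.contains c || pvProblematicChars.contains c) := by
    simp
  rw [this]
  cases hi : pvIllegalChars.contains c <;> cases hp : pvProblematicChars.contains c <;> simp

-- ===== VERDICT (by name: the statement is the Claim_ definition above) =====
set_option maxRecDepth 8192 in
theorem clean_cell_value_spec : Claim_equal_clean_cell_value := by
  intro value _
  unfold Spec_clean_cell_value clean_cell_value clean_cell_value_alt
  cases value with
  | none => rfl
  | some v0 =>
    simp only
    rw [take_one_eq_startswith]
    set s0 := PySem.Chars.strip v0.toList with hs0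
    have hbranch : (if PySem.Chars.startswith s0 ['B'] && s0.any PySem.Chars.isdigit
          then PySem.List.slice (PySem.Chars.join [] (PySem.Chars.split₀ s0)) none (some 11)
          else s0)
        = (if PySem.Chars.startswith s0 ['B'] && s0.any PySem.Chars.isdigit
          then PySem.List.slice (s0.filter (fun c => !PySem.Chars.isspace c)) none (some 11)
          else s0) := by
      rw [join_nil_flatten, split0_flatten]
    rw [hbranch]
    set s1 := if PySem.Chars.startswith s0 ['B'] && s0.any PySem.Chars.isdigit
              then PySem.List.slice (s0.filter (fun c => !PySem.Chars.isspace c)) none (some 11)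
              else s0 with hs1
    rw [foldl_replace_filter, foldl_replace_filter, List.filter_filter]
    rw [filter_map_eq_filterMap]
    have hB : (s1.map pvCleanChar).filterMap id = s1.filterMap pvCleanChar := by
      simp [List.filterMap_map]
    rw [hB]
    have hfn : pvCleanChar = fun c =>
        if (!pvProblematicChars.contains c && !pvIllegalChars.contains c)
        then some (if pvIsprintable c then c else ' ') else none := funext pvCleanChar_eq
    rw [hfn]
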